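-- pv_equiv track=rewrite | github.com/EgorSborschikov/zadanya_na_podymat | zadanye2.py | find_min_distance_and_cost
-- ===== SOURCE A (Python) =====
-- def find_min_distance_and_cost(t, costs):
--     n = len(costs)
--     results = []
--
--     # Создаём перечисление с индексами и сортируем по стоимости
--     indexed_costs = sorted((costs[i], i) for i in range(n))
--
--     # Двигаемся по отсортированному списку
--     for start in range(n):
--         current_cost = 0
--         for end in range(start, n):
--             current_cost += indexed_costs[end][0]
--             if end - start + 1 > t:  # Слишком много пробирок, выходим из цикла
--                 break
--             if end - start + 1 == t:  # У нас есть t пробирок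
--                 # Получаем индексы пробирок
--                 indices = [indexed_costs[i][1] for i in range(start, end + 1)]
--                 distance = max(indices) - min(indices) + 1  # Расстояние
--                 results.append((current_cost, distance))
--
--     # Находим минимальные затраты и соответствующее расстояние
--     min_cost = float('inf')
--     min_distance = float('inf')
--
--     for cost, distance in results:
--         if cost < min_cost:
--             min_cost = cost
--             min_distance = distance
--         elif cost == min_cost:
--             min_distance = min(min_distance, distance)
--
--     return min_distance if min_distance != float('inf') else -1  # Если не нашли
-- ===== SOURCE B (Python) =====
-- def find_min_distance_and_cost(t, costs):
--     n = len(costs)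
--     if t < 1 or t > n:
--         return -1
--     pairs = sorted((c, i) for i, c in enumerate(costs))
--     prefix = [0]
--     for c, _ in pairs:
--         prefix.append(prefix[-1] + c)
--     best = None
--     for s in range(n - t + 1):
--         window = [i for _, i in pairs[s:s + t]]
--         cand = (prefix[s + t] - prefix[s], max(window) - min(window) + 1)
--         if best is None or cand < best:
--             best = cand
--     return best[1]
-- ===== Notes on version B (the rewrite author's own statement) =====
-- stated objective: alternative
-- what changed: Replaces A's nested accumulate-and-break loop plus a results list and a second minimisation pass by an early return for degenerate t, one prefix-sum array giving each window cost in O(1), and a single pass over window starts keeping the lexicographic best (cost, span) tuple.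
import Mathlib
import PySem

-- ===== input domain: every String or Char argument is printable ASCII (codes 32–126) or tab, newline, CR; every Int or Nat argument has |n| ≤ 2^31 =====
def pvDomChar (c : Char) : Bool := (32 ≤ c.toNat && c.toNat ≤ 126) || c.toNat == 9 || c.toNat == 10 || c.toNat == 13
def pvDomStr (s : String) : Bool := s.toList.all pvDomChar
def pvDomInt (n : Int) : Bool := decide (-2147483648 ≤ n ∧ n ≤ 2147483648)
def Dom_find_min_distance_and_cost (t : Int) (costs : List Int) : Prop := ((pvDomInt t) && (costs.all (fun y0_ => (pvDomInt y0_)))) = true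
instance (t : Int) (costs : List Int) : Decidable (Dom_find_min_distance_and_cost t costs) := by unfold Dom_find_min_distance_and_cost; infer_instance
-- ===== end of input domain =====

-- B replaces A's nested accumulate-and-break loops + results list + second minimisation pass by an
-- early return, a prefix-sum list giving each window cost in O(1) and one lexicographic-best pass
-- (objective: alternative; same asymptotic cost).

-- ===== PORT A =====
-- inner 'for end in range(start, n)' loop with its break; indexed_costs indexing is always in range
def pvA_inner (t : Int) (idx : List (Int × Int)) (start : Int) (ends : List Int)
    (cc : Int) (results : List (Int × Int)) : List (Int × Int) :=
  match ends with
  | [] => results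
  | e :: rest =>
    let cc' := cc + (PySem.List.pyGetD idx e (0, 0)).1
    if e - start + 1 > t then results
    else if e - start + 1 = t then
      let indices := (PySem.List.pyRange start (e + 1) 1).map (fun i => (PySem.List.pyGetD idx i (0, 0)).2)
      let distance := (PySem.List.max? indices (fun x => x)).getD 0 - (PySem.List.min? indices (fun x => x)).getD 0 + 1
      pvA_inner t idx start rest cc' (results ++ [(cc', distance)])
    else pvA_inner t idx start rest cc' results

def find_min_distance_and_cost (t : Int) (costs : List Int) : Int :=
  let n : Int := PySem.List.len costs
  let indexed := PySem.List.sorted2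
      ((PySem.List.pyRange 0 n 1).map (fun i => (PySem.List.pyGetD costs i 0, i))) (·.1) (·.2)
  let results := (PySem.List.pyRange 0 n 1).foldl
      (fun res start => pvA_inner t indexed start (PySem.List.pyRange start n 1) 0 res) []
  -- float('inf') sentinels become 'none' (cost < inf for every int cost)
  let final := results.foldl (fun (st : Option Int × Option Int) cd =>
      match st.1 with
      | none => (some cd.1, some cd.2)
      | some m =>
        if cd.1 < m then (some cd.1, some cd.2)
        else if cd.1 = m then (st.1, some (min (st.2.getD 0) cd.2))
        else st) (none, none)
  match final.2 with
  | some d => d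
  | none => -1

-- ===== PORT B =====
-- body of B's single 'for s in range(n - t + 1)' loop
def pvB_step (pairs : List (Int × Int)) (pref : List Int) (t : Int)
    (best : Option (Int × Int)) (s : Int) : Option (Int × Int) :=
  let window := (PySem.List.slice pairs (some s) (some (s + t))).map (·.2)
  let cand := (PySem.List.pyGetD pref (s + t) 0 - PySem.List.pyGetD pref s 0,
               (PySem.List.max? window (fun x => x)).getD 0 - (PySem.List.min? window (fun x => x)).getD 0 + 1)
  match best with
  | none => some cand
  | some b => if cand.1 < b.1 ∨ (cand.1 = b.1 ∧ cand.2 < b.2) then some cand else some b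

def find_min_distance_and_cost_alt (t : Int) (costs : List Int) : Int :=
  let n : Int := PySem.List.len costs
  if t < 1 ∨ t > n then -1
  else
    let pairs := PySem.List.sorted2
        ((PySem.List.enumerate costs).map (fun p => (p.2, p.1))) (·.1) (·.2)
    let pref := pairs.foldl (fun pr p => pr ++ [PySem.List.pyGetD pr (-1) 0 + p.1]) [0]
    let best := (PySem.List.pyRange 0 (n - t + 1) 1).foldl (pvB_step pairs pref t) none
    match best with
    | some b => b.2
    | none => -1

-- ===== PRECONDITION & SPEC =====
def Spec_find_min_distance_and_cost (t : Int) (costs : List Int) (out : Int) : Prop := out = find_min_distance_and_cost_alt t costs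
instance (t : Int) (costs : List Int) (out : Int) : Decidable (Spec_find_min_distance_and_cost t costs out) := by unfold Spec_find_min_distance_and_cost; infer_instance

-- ===== CLAIM (what is proved, stated in full; the proofs are below) =====
def Claim_equal_find_min_distance_and_cost : Prop := ∀ (t : Int) (costs : List Int), Dom_find_min_distance_and_cost t costs → Spec_find_min_distance_and_cost t costs (find_min_distance_and_cost t costs)


-- ===== LEMMAS AND PROOFS =====

-- the per-start value A appends: window cost and index span, phrased over pyRange indexing
def pvDist (idx : List (Int × Int)) (s t : Int) : Int :=
  let indices := (PySem.List.pyRange s (s + t) 1).map (fun i => (PySem.List.pyGetD idx i (0, 0)).2)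
  (PySem.List.max? indices (fun x => x)).getD 0 - (PySem.List.min? indices (fun x => x)).getD 0 + 1

def pvF (idx : List (Int × Int)) (t : Int) (s : Int) : Int × Int :=
  (((PySem.List.pyRange s (s + t) 1).map (fun i => (PySem.List.pyGetD idx i (0, 0)).1)).sum, pvDist idx s t)

-- once the window is already longer than t (or t < 1), the inner loop appends nothing
theorem pvA_inner_past (t : Int) (idx : List (Int × Int)) (s e0 b cc : Int)
    (res : List (Int × Int)) (h : s + t ≤ e0) :
    pvA_inner t idx s (PySem.List.pyRange e0 b 1) cc res = res := by
  by_cases hb : b ≤ e0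
  · rw [PySem.List.pyRange_one_eq_nil hb]
    rfl
  · rw [PySem.List.pyRange_one_cons (by omega)]
    simp only [pvA_inner]
    rw [if_pos (by omega)]

-- the accumulating phase of the inner loop: from position e0 (window not yet full) it appends
-- exactly one candidate iff the full window fits
theorem pvA_inner_run (k : Nat) : ∀ (t : Int) (idx : List (Int × Int)) (s e0 b cc : Int)
    (res : List (Int × Int)), 1 ≤ t → s ≤ e0 → e0 + (k : Int) = s + t - 1 →
    pvA_inner t idx s (PySem.List.pyRange e0 b 1) cc res =
      if s + t ≤ b then
        res ++ [(cc + ((PySem.List.pyRange e0 (s + t) 1).map (fun i => (PySem.List.pyGetD idx i (0, 0)).1)).sum,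
                 pvDist idx s t)]
      else res := by
  induction k with
  | zero =>
    intro t idx s e0 b cc res ht hse hk
    by_cases hb : b ≤ e0
    · rw [PySem.List.pyRange_one_eq_nil hb, if_neg (by omega)]
      rfl
    · rw [PySem.List.pyRange_one_cons (by omega)]
      simp only [pvA_inner]
      rw [if_neg (by omega), if_pos (by omega)]
      rw [pvA_inner_past t idx s (e0 + 1) b _ _ (by omega)]
      rw [if_pos (by omega)]
      have he1 : e0 + 1 = s + t := by omega
      rw [he1]
      have : PySem.List.pyRange e0 (s + t) 1 = [e0] := by
        rw [← he1]; exact PySem.List.pyRange_one_singleton e0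
      rw [this]
      simp [pvDist]
  | succ m ih =>
    intro t idx s e0 b cc res ht hse hk
    by_cases hb : b ≤ e0
    · rw [PySem.List.pyRange_one_eq_nil hb, if_neg (by omega)]
      rfl
    · rw [PySem.List.pyRange_one_cons (by omega)]
      simp only [pvA_inner]
      rw [if_neg (by omega), if_neg (by omega)]
      rw [ih t idx s (e0 + 1) b _ res ht (by omega) (by push_cast at hk ⊢; omega)]
      have hsplit : PySem.List.pyRange e0 (s + t) 1 = e0 :: PySem.List.pyRange (e0 + 1) (s + t) 1 :=
        PySem.List.pyRange_one_cons (by omega)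
      rw [hsplit]
      split_ifs with h
      · simp only [List.map_cons, List.sum_cons]
        congr 3
        ring
      · rfl

-- the filter of window starts that fit is itself a range
theorem pvFilter_range (t : Int) (ht : 1 ≤ t) : ∀ (k : Nat) (a n : Int), a + (k : Int) = n →
    (PySem.List.pyRange a n 1).filter (fun s => decide (s + t ≤ n)) = PySem.List.pyRange a (n - t + 1) 1 := by
  intro k
  induction k with
  | zero =>
    intro a n hk
    rw [PySem.List.pyRange_one_eq_nil (by omega), PySem.List.pyRange_one_eq_nil (by omega)]
    rfl
  | succ m ih =>
    intro a n hk
    have hk' : a + (m : Int) + 1 = n := by push_cast at hk; omega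
    rw [PySem.List.pyRange_one_cons (show a < n by omega)]
    by_cases h : a + t ≤ n
    · rw [List.filter_cons_of_pos (by simpa using h)]
      rw [ih (a + 1) n (by omega)]
      conv_rhs => rw [PySem.List.pyRange_one_cons (show a < n - t + 1 by omega)]
    · rw [List.filter_cons_of_neg (by simpa using h)]
      rw [List.filter_eq_nil_iff.mpr (by
        intro x hx
        rw [PySem.List.mem_pyRange_one] at hx
        simp only [decide_eq_true_eq]
        omega)]
      rw [PySem.List.pyRange_one_eq_nil (by omega)]

-- A's results list, in closed form
theorem pvA_results (t : Int) (idx : List (Int × Int)) (n : Int) (hn : 0 ≤ n) :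
    (PySem.List.pyRange 0 n 1).foldl
      (fun res start => pvA_inner t idx start (PySem.List.pyRange start n 1) 0 res) [] =
    if 1 ≤ t then ((PySem.List.pyRange 0 (n - t + 1) 1).map (pvF idx t)) else [] := by
  by_cases ht : 1 ≤ t
  · rw [if_pos ht]
    have hcong : ∀ (res : List (Int × Int)), ∀ s ∈ PySem.List.pyRange 0 n 1,
        pvA_inner t idx s (PySem.List.pyRange s n 1) 0 res =
        (if s + t ≤ n then res ++ [pvF idx t s] else res) := by
      intro res s hs
      rw [PySem.List.mem_pyRange_one] at hs
      rw [pvA_inner_run (t - 1).toNat t idx s s n 0 res ht le_rfl (by omega)]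
      simp [pvF, pvDist]
    rw [PySem.List.foldl_congr_mem _ _ _ _ hcong]
    rw [PySem.List.foldl_append_ite (fun s => s + t ≤ n) (pvF idx t)]
    rw [pvFilter_range t ht n.toNat 0 n (by omega)]
    simp
  · rw [if_neg ht]
    have hcong : ∀ (res : List (Int × Int)), ∀ s ∈ PySem.List.pyRange 0 n 1,
        pvA_inner t idx s (PySem.List.pyRange s n 1) 0 res = res := by
      intro res s _
      exact pvA_inner_past t idx s s n 0 res (by omega)
    rw [PySem.List.foldl_congr_mem _ _ _ _ hcong]
    exact PySem.List.foldl_ignore _ _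

-- pyRange-indexed window = drop/take window
theorem pvWindow_map {α : Type} (P : List α) (d : α) : ∀ (k : Nat) (a b : Int), 0 ≤ a → b ≤ (P.length : Int) →
    b - a = (k : Int) →
    (PySem.List.pyRange a b 1).map (fun i => PySem.List.pyGetD P i d) = (P.drop a.toNat).take k := by
  intro k
  induction k with
  | zero =>
    intro a b ha hb hk
    rw [PySem.List.pyRange_one_eq_nil (by omega)]
    simp
  | succ m ih =>
    intro a b ha hb hk
    have hk' : b - a = (m : Int) + 1 := by push_cast at hk; omega
    rw [PySem.List.pyRange_one_cons (show a < b by omega)]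
    have hal : a.toNat < P.length := by omega
    rw [List.map_cons, ih (a + 1) b (by omega) hb (by omega)]
    rw [PySem.List.pyGetD_eq_getElem P d ha (by omega)]
    have h1 : (a + 1).toNat = a.toNat + 1 := by omega
    rw [h1, List.drop_eq_getElem_cons hal, List.take_succ_cons]

-- the partial-sums list B builds
def pvPsums (l : List (Int × Int)) (a : Int) : List Int :=
  match l with
  | [] => []
  | p :: r => (a + p.1) :: pvPsums r (a + p.1)

theorem pvPrefix_foldl : ∀ (l : List (Int × Int)) (pre : List Int) (a : Int),
    l.foldl (fun pr p => pr ++ [PySem.List.pyGetD pr (-1) 0 + p.1]) (pre ++ [a]) =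
      pre ++ a :: pvPsums l a := by
  intro l
  induction l with
  | nil => intro pre a; simp [pvPsums]
  | cons p r ih =>
    intro pre a
    simp only [List.foldl_cons, PySem.List.pyGetD_neg_one_append_singleton]
    have : pre ++ [a] ++ [a + p.1] = (pre ++ [a]) ++ [a + p.1] := by simp
    rw [this, ih (pre ++ [a]) (a + p.1)]
    simp [pvPsums]

theorem pvPsums_length (l : List (Int × Int)) : ∀ a, (pvPsums l a).length = l.length := by
  induction l with
  | nil => intro a; rfl
  | cons p r ih => intro a; simp [pvPsums, ih]

theorem pvPsums_getElem (l : List (Int × Int)) : ∀ (a : Int) (k : Nat) (hk : k < l.length),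
    (pvPsums l a)[k]'(by rw [pvPsums_length]; exact hk) = a + ((l.take (k + 1)).map (·.1)).sum := by
  induction l with
  | nil => intro a k hk; simp at hk
  | cons p r ih =>
    intro a k hk
    cases k with
    | zero => simp [pvPsums]
    | succ m =>
      simp only [pvPsums, List.getElem_cons_succ, List.take_succ_cons, List.map_cons, List.sum_cons]
      rw [ih (a + p.1) m (by simpa using hk)]
      ring

-- pref[j] is the sum of the first j window costs
theorem pvPref_get (l : List (Int × Int)) (j : Int) (h0 : 0 ≤ j) (h1 : j ≤ (l.length : Int)) :
    PySem.List.pyGetD (0 :: pvPsums l 0) j 0 = ((l.take j.toNat).map (·.1)).sum := by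
  rw [PySem.List.pyGetD_eq_getElem _ _ h0 (by simp [pvPsums_length]; omega)]
  rcases Nat.eq_zero_or_pos j.toNat with hz | hp
  · simp [hz]
  · obtain ⟨m, hm⟩ : ∃ m, j.toNat = m + 1 := ⟨j.toNat - 1, by omega⟩
    rw [← List.getD_eq_getElem _ 0, hm, List.getD_cons_succ,
        List.getD_eq_getElem _ 0 (by rw [pvPsums_length]; omega)]
    rw [pvPsums_getElem l 0 m (by omega)]
    rw [← hm]
    simp

-- the fold-state packing between A's pair of optional accumulators and B's optional pair
def pvPack (st : Option (Int × Int)) : Option Int × Option Int :=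
  match st with
  | none => (none, none)
  | some (c, d) => (some c, some d)

theorem pvFold_pack (l : List (Int × Int)) : ∀ (st : Option (Int × Int)),
    l.foldl (fun (st : Option Int × Option Int) cd =>
      match st.1 with
      | none => (some cd.1, some cd.2)
      | some m =>
        if cd.1 < m then (some cd.1, some cd.2)
        else if cd.1 = m then (st.1, some (min (st.2.getD 0) cd.2))
        else st) (pvPack st) =
    pvPack (l.foldl (fun (best : Option (Int × Int)) cd =>
      match best with
      | none => some cd
      | some b => if cd.1 < b.1 ∨ (cd.1 = b.1 ∧ cd.2 < b.2) then some cd else some b) st) := by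
  induction l with
  | nil => intro st; rfl
  | cons cd r ih =>
    intro st
    simp only [List.foldl_cons]
    have hstep : (match (pvPack st).1 with
        | none => (some cd.1, some cd.2)
        | some m =>
          if cd.1 < m then (some cd.1, some cd.2)
          else if cd.1 = m then ((pvPack st).1, some ((pvPack st).2.getD 0 ⊓ cd.2))
          else pvPack st) =
        pvPack (match st with
        | none => some cd
        | some b => if cd.1 < b.1 ∨ (cd.1 = b.1 ∧ cd.2 < b.2) then some cd else some b) := by
      match st with
      | none => rfl
      | some (c, d) =>
        simp only [pvPack]
        by_cases h1 : cd.1 < c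
        · rw [if_pos h1, if_pos (Or.inl h1)]
        · rw [if_neg h1]
          by_cases h2 : cd.1 = c
          · rw [if_pos h2]
            by_cases h3 : cd.2 < d
            · rw [if_pos (Or.inr ⟨h2, h3⟩)]
              simp [h2, min_eq_right (le_of_lt h3)]
            · rw [if_neg (by simp [h2]; omega)]
              simp [min_eq_left (not_lt.mp h3)]
          · rw [if_neg h2, if_neg (by simp [h1, h2])]
    rw [hstep, ih]

-- fusing B's loop over starts into a loop over candidate pairs
theorem pvFoldB (l : List Int) (f : Int → Int × Int) : ∀ (st : Option (Int × Int)),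
    l.foldl (fun (best : Option (Int × Int)) s =>
      match best with
      | none => some (f s)
      | some b => if (f s).1 < b.1 ∨ ((f s).1 = b.1 ∧ (f s).2 < b.2) then some (f s) else some b) st
    = (l.map f).foldl (fun (best : Option (Int × Int)) cd =>
      match best with
      | none => some cd
      | some b => if cd.1 < b.1 ∨ (cd.1 = b.1 ∧ cd.2 < b.2) then some cd else some b) st := by
  induction l with
  | nil => intro st; rfl
  | cons x r ih => intro st; simp only [List.foldl_cons, List.map_cons]; rw [ih]

-- B's loop body computes exactly A's per-start candidate
theorem pvB_step_eq (P : List (Int × Int)) (t s : Int) (ht : 1 ≤ t) (hs0 : 0 ≤ s)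
    (hsn : s + t ≤ (P.length : Int)) (best : Option (Int × Int)) :
    pvB_step P (0 :: pvPsums P 0) t best s =
      (match best with
       | none => some (pvF P t s)
       | some b => if (pvF P t s).1 < b.1 ∨ ((pvF P t s).1 = b.1 ∧ (pvF P t s).2 < b.2)
                   then some (pvF P t s) else some b) := by
  have hw : (PySem.List.pyRange s (s + t) 1).map (fun i => PySem.List.pyGetD P i ((0 : Int), (0 : Int)))
      = (P.drop s.toNat).take t.toNat :=
    pvWindow_map P (0, 0) t.toNat s (s + t) hs0 (by omega) (by omega)
  have hslice : PySem.List.slice P (some s) (some (s + t)) = (P.drop s.toNat).take t.toNat := by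
    rw [PySem.List.slice_toNat P hs0 (by omega)]
    congr 1
    omega
  have hc1 : PySem.List.pyGetD (0 :: pvPsums P 0) (s + t) 0 - PySem.List.pyGetD (0 :: pvPsums P 0) s 0
      = (pvF P t s).1 := by
    rw [pvPref_get P (s + t) (by omega) (by omega), pvPref_get P s hs0 (by omega)]
    simp only [pvF]
    have hcomp : (fun i => (PySem.List.pyGetD P i ((0 : Int), (0 : Int))).1)
        = (fun x : Int × Int => x.1) ∘ (fun i => PySem.List.pyGetD P i ((0 : Int), (0 : Int))) := rfl
    rw [hcomp, ← List.map_map, hw]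
    have hsplit : (s + t).toNat = s.toNat + t.toNat := by omega
    rw [hsplit, List.take_add, List.map_append, List.sum_append]
    ring
  have hc2 : (PySem.List.max? ((PySem.List.slice P (some s) (some (s + t))).map (fun x : Int × Int => x.2)) (fun x => x)).getD 0
      - (PySem.List.min? ((PySem.List.slice P (some s) (some (s + t))).map (fun x : Int × Int => x.2)) (fun x => x)).getD 0 + 1
      = (pvF P t s).2 := by
    simp only [pvF, pvDist]
    have hcomp : (fun i => (PySem.List.pyGetD P i ((0 : Int), (0 : Int))).2)
        = (fun x : Int × Int => x.2) ∘ (fun i => PySem.List.pyGetD P i ((0 : Int), (0 : Int))) := rfl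
    rw [hslice, hcomp, ← List.map_map, hw]
  unfold pvB_step
  dsimp only
  rw [hc1, hc2]

-- ===== VERDICT (by name: the statement is the Claim_ definition above) =====
theorem find_min_distance_and_cost_spec : Claim_equal_find_min_distance_and_cost := by
  unfold Claim_equal_find_min_distance_and_cost
  intro t costs _
  unfold Spec_find_min_distance_and_cost
  have hswap : (PySem.List.enumerate costs).map (fun p => (p.2, p.1)) =
      (PySem.List.pyRange 0 (PySem.List.len costs) 1).map (fun i => (PySem.List.pyGetD costs i 0, i)) := by
    rw [PySem.List.enumerate_eq_map_pyRange costs 0, List.map_map]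
    rfl
  simp only [find_min_distance_and_cost, find_min_distance_and_cost_alt, hswap, PySem.List.len_eq]
  obtain ⟨n, hn⟩ : ∃ n : Int, (costs.length : Int) = n := ⟨_, rfl⟩
  rw [hn]
  have hn0 : 0 ≤ n := by omega
  obtain ⟨P, hPdef⟩ : ∃ P : List (Int × Int), PySem.List.sorted2
      ((PySem.List.pyRange 0 n 1).map (fun i => (PySem.List.pyGetD costs i 0, i)))
      (fun x => x.1) (fun x => x.2) false = P := ⟨_, rfl⟩
  rw [hPdef]
  have hPlen : (P.length : Int) = n := by
    rw [← hPdef]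
    have hperm := PySem.List.sorted2_perm
      ((PySem.List.pyRange 0 n 1).map (fun i => (PySem.List.pyGetD costs i 0, i)))
      (fun x : Int × Int => x.1) (fun x : Int × Int => x.2) false
    rw [hperm.length_eq, List.length_map, PySem.List.length_pyRange_one]
    omega
  rw [pvA_results t P n hn0]
  by_cases hdeg : t < 1 ∨ n < t
  · rw [if_pos hdeg]
    have hempty : (if 1 ≤ t then (PySem.List.pyRange 0 (n - t + 1) 1).map (pvF P t) else []) = [] := by
      by_cases ht : 1 ≤ t
      · rw [if_pos ht, PySem.List.pyRange_one_eq_nil (by omega)]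
        rfl
      · rw [if_neg ht]
    rw [hempty]
    rfl
  · obtain ⟨ht1, htn⟩ := not_or.mp hdeg
    have ht1' : 1 ≤ t := not_lt.mp ht1
    have htn' : t ≤ n := not_lt.mp htn
    rw [if_neg hdeg, if_pos ht1']
    have hpref := pvPrefix_foldl P [] 0
    simp only [List.nil_append] at hpref
    rw [hpref]
    have hcong : ∀ (best : Option (Int × Int)), ∀ s ∈ PySem.List.pyRange 0 (n - t + 1) 1,
        pvB_step P (0 :: pvPsums P 0) t best s =
        (fun (best : Option (Int × Int)) s =>
          match best with
          | none => some (pvF P t s)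
          | some b => if (pvF P t s).1 < b.1 ∨ ((pvF P t s).1 = b.1 ∧ (pvF P t s).2 < b.2)
                      then some (pvF P t s) else some b) best s := by
      intro best s hs
      rw [PySem.List.mem_pyRange_one] at hs
      exact pvB_step_eq P t s ht1' hs.1 (by rw [hPlen]; omega) best
    rw [PySem.List.foldl_congr_mem _ _ _ _ hcong]
    rw [pvFoldB (PySem.List.pyRange 0 (n - t + 1) 1) (pvF P t) none]
    rw [show ((none, none) : Option Int × Option Int) = pvPack none from rfl]
    rw [pvFold_pack ((PySem.List.pyRange 0 (n - t + 1) 1).map (pvF P t)) none]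
    cases hb : ((PySem.List.pyRange 0 (n - t + 1) 1).map (pvF P t)).foldl
        (fun (best : Option (Int × Int)) cd =>
          match best with
          | none => some cd
          | some b => if cd.1 < b.1 ∨ (cd.1 = b.1 ∧ cd.2 < b.2) then some cd else some b) none with
    | none => rfl
    | some b =>
      obtain ⟨c, d⟩ := b
      rfl
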